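-- pv_equiv track=rewrite | github.com/brunocaxias/college_dump | Programação I/prova2/Q1/mod20211BSI0119Q1.py | f_converteBaseNBase16
-- ===== SOURCE A (Python) =====
-- def f_converteBaseNBase16(n,b):
--     i = int(0)
--     decimal = int(0)
--     #-----------------------
--     while n > 0:
--         dec = n % 10
--         decimal = decimal + dec * (b**i)
--         n = n//10
--         i += 1
--     #-----------------------
--     hexadecimal = str("")
--     quoc = int(0)
--     letters = str("")
--     if decimal < 10:
--         hexadecimal = str(decimal)
--     else:
--         while decimal > 0:
--             quoc = decimal % 16
--             letters = str(quoc)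
--             if quoc == 10:
--                 letters = str("A")
--
--             if quoc == 11:
--                 letters = str("B")
--
--             if quoc == 12:
--                 letters = str("C")
--
--             if quoc == 13:
--                 letters = str("D")
--
--             if quoc == 14:
--                 letters = str("E")
--
--             if quoc == 15:
--                 letters = str("F")
--             hexadecimal = letters + hexadecimal
--             decimal = decimal // 16
--     return hexadecimal
-- ===== SOURCE B (Python) =====
-- def f_converteBaseNBase16(n, b):
--     # Horner over the decimal digits of n (most-significant first), then format as uppercase hex.
--     decimal = 0
--     for ch in (str(n) if n > 0 else ""):
--         decimal = decimal * b + int(ch)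
--     return str(decimal) if decimal < 10 else format(decimal, 'X')
-- ===== Notes on version B (the rewrite author's own statement) =====
-- stated objective: idiomatic
-- what changed: B computes the value with Horner's rule over str(n) most-significant-digit-first instead of A's b**i power-accumulation over n%10, and renders it with format(decimal,'X') instead of A's hand-rolled six-branch hex-digit loop.
import Mathlib
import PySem

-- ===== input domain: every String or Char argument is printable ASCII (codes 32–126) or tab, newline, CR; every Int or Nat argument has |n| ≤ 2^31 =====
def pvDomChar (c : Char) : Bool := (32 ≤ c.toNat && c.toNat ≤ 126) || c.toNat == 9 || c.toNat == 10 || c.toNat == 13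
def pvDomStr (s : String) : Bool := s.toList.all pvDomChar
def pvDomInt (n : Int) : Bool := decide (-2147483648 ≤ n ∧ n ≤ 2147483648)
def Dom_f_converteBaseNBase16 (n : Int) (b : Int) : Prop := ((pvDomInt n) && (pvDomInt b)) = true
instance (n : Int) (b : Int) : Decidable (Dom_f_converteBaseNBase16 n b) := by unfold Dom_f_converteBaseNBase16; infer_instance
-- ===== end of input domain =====

-- B reads the decimal digits of n most-significant-first with Horner's rule and renders the
-- value with a standard uppercase-hex formatter, replacing A's b**i power-sum loop and its
-- hand-rolled six-branch hex-digit loop (objective: idiomatic; same behaviour, proved equal).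

-- ===== PORT A =====
-- first while loop: dec = n % 10; decimal += dec * b**i; n //= 10; i += 1
def pvALoop1 (n : Int) (b : Int) (i : Nat) (decimal : Int) : Int :=
  if h : n > 0 then
    pvALoop1 (PySem.Int.floordiv n 10) b (i + 1) (decimal + PySem.Int.mod n 10 * b ^ i)
  else decimal
termination_by n.toNat
decreasing_by
  rw [PySem.Int.floordiv_eq_ediv_of_pos (by norm_num)]
  omega

-- second while loop: quoc = decimal % 16; letters = str(quoc) overridden by the six ifs;
-- hexadecimal = letters + hexadecimal; decimal //= 16
def pvALoop2 (decimal : Int) (hexadecimal : String) : String :=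
  if h : decimal > 0 then
    let quoc := PySem.Int.mod decimal 16
    let letters := PySem.Int.toStr quoc
    let letters := if quoc = 10 then "A" else letters
    let letters := if quoc = 11 then "B" else letters
    let letters := if quoc = 12 then "C" else letters
    let letters := if quoc = 13 then "D" else letters
    let letters := if quoc = 14 then "E" else letters
    let letters := if quoc = 15 then "F" else letters
    pvALoop2 (PySem.Int.floordiv decimal 16) (letters ++ hexadecimal)
  else hexadecimal
termination_by decimal.toNat
decreasing_by
  rw [PySem.Int.floordiv_eq_ediv_of_pos (by norm_num)]
  omega

def f_converteBaseNBase16 (n : Int) (b : Int) : String :=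
  let decimal := pvALoop1 n b 0 0
  if decimal < 10 then PySem.Int.toStr decimal
  else pvALoop2 decimal ""

-- ===== PORT B =====
-- hand port of Python's format(d, 'X') (no PySem primitive): uppercase hex, '-' for negatives
def pvHexDig (k : Nat) : String := String.singleton ("0123456789ABCDEF".toList.getD k '0')

def pvToHex (m : Nat) : String :=
  if h : m < 16 then pvHexDig m
  else pvToHex (m / 16) ++ pvHexDig (m % 16)
termination_by m
decreasing_by omega

def pvFormatX (d : Int) : String :=
  if d < 0 then "-" ++ pvToHex (-d).toNat else pvToHex d.toNat

def f_converteBaseNBase16_alt (n : Int) (b : Int) : String :=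
  -- for ch in (str(n) if n > 0 else ""): decimal = decimal * b + int(ch)
  -- int(ch) is ported as ch.toNat - 48, exact because ch is a decimal digit of str(n) with n > 0
  let digits := if n > 0 then (PySem.Int.toStr n).toList else []
  let decimal := digits.foldl (fun acc ch => acc * b + ((ch.toNat : Int) - 48)) 0
  if decimal < 10 then PySem.Int.toStr decimal else pvFormatX decimal

-- ===== PRECONDITION & SPEC =====
def Spec_f_converteBaseNBase16 (n : Int) (b : Int) (out : String) : Prop := out = f_converteBaseNBase16_alt n b
instance (n : Int) (b : Int) (out : String) : Decidable (Spec_f_converteBaseNBase16 n b out) := by unfold Spec_f_converteBaseNBase16; infer_instance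

-- ===== CLAIM (what is proved, stated in full; the proofs are below) =====
def Claim_equal_f_converteBaseNBase16 : Prop := ∀ (n : Int) (b : Int), Dom_f_converteBaseNBase16 n b → Spec_f_converteBaseNBase16 n b (f_converteBaseNBase16 n b)

-- ===== LEMMAS AND PROOFS =====

-- the common value: Σ dⱼ·bʲ over the decimal digits dⱼ of m
def pvVal (b : Int) (m : Nat) : Int :=
  if m = 0 then 0 else b * pvVal b (m / 10) + (m % 10 : Nat)
termination_by m
decreasing_by omega

-- the decimal digit characters of m, most significant first
def pvDigs (m : Nat) : List Char :=
  if m < 10 then [Nat.digitChar m] else pvDigs (m / 10) ++ [Nat.digitChar (m % 10)]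
termination_by m
decreasing_by omega

theorem pvDigitChar_toNat (k : Nat) (hk : k < 10) :
    ((Nat.digitChar k).toNat : Int) = (k : Int) + 48 := by
  interval_cases k <;> decide

theorem pvALoop1_eq (b : Int) : ∀ (k : Nat) (n : Int), n.toNat = k → ∀ (i : Nat) (acc : Int),
    pvALoop1 n b i acc = acc + pvVal b k * b ^ i := by
  intro k
  induction k using Nat.strong_induction_on with
  | _ k ih =>
    intro n hk i acc
    rw [pvALoop1]
    split_ifs with h
    · have h10 : PySem.Int.floordiv n 10 = n / 10 :=
        PySem.Int.floordiv_eq_ediv_of_pos (by norm_num)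
      have hm10 : PySem.Int.mod n 10 = n % 10 :=
        PySem.Int.mod_eq_emod_of_pos (by norm_num)
      rw [h10, hm10, ih (n / 10).toNat (by omega) (n / 10) rfl]
      have h1 : n % 10 = ((k % 10 : Nat) : Int) := by omega
      have h2 : (n / 10).toNat = k / 10 := by omega
      have hvk : pvVal b k = b * pvVal b (k / 10) + ((k % 10 : Nat) : Int) := by
        rw [pvVal, if_neg (by omega : ¬ k = 0)]
      rw [h1, h2, hvk, pow_succ]
      ring
    · have hk0 : k = 0 := by omega
      rw [hk0, pvVal]
      simp

theorem toDigitsCore_eq_pvDigs : ∀ (f m : Nat) (l : List Char), m < f →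
    Nat.toDigitsCore 10 f m l = pvDigs m ++ l := by
  intro f
  induction f with
  | zero => omega
  | succ f ih =>
    intro m l hm
    rw [Nat.toDigitsCore]
    by_cases h : m / 10 = 0
    · rw [if_pos h, pvDigs, if_pos (by omega : m < 10),
        Nat.mod_eq_of_lt (by omega : m < 10)]
      rfl
    · rw [if_neg h, ih (m / 10) _ (by omega)]
      conv_rhs => rw [pvDigs]
      rw [if_neg (by omega : ¬ m < 10), List.append_assoc]
      rfl

theorem foldl_pvDigs_gen (b : Int) : ∀ (m : Nat) (acc : Int),
    (pvDigs m).foldl (fun acc ch => acc * b + ((ch.toNat : Int) - 48)) acc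
      = acc * b ^ (pvDigs m).length + pvVal b m := by
  intro m
  induction m using Nat.strong_induction_on with
  | _ m ih =>
    intro acc
    by_cases h : m < 10
    · rw [pvDigs, if_pos h]
      simp only [List.foldl_cons, List.foldl_nil, List.length_singleton, pow_one]
      rw [pvDigitChar_toNat m h]
      by_cases h0 : m = 0
      · rw [h0, pvVal]; simp
      · rw [pvVal, if_neg h0, Nat.div_eq_of_lt h, Nat.mod_eq_of_lt h, pvVal]
        simp
    · rw [pvDigs, if_neg h]
      rw [List.foldl_append, ih (m / 10) (by omega) acc]
      simp only [List.foldl_cons, List.foldl_nil, List.length_append,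
        List.length_singleton]
      have hvm : pvVal b m = b * pvVal b (m / 10) + ((m % 10 : Nat) : Int) := by
        rw [pvVal, if_neg (by omega : ¬ m = 0)]
      rw [pvDigitChar_toNat (m % 10) (Nat.mod_lt _ (by norm_num)), hvm, pow_succ]
      push_cast
      ring

theorem pvLetters_eq (k : Nat) (hk : k < 16) :
    (if ((k : Nat) : Int) = 15 then "F"
     else if ((k : Nat) : Int) = 14 then "E"
     else if ((k : Nat) : Int) = 13 then "D"
     else if ((k : Nat) : Int) = 12 then "C"
     else if ((k : Nat) : Int) = 11 then "B"
     else if ((k : Nat) : Int) = 10 then "A"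
     else PySem.Int.toStr ((k : Nat) : Int)) = pvHexDig k := by
  interval_cases k <;> decide

theorem pvALoop2_eq : ∀ (m : Nat), 0 < m → ∀ (s : String),
    pvALoop2 (m : Int) s = pvToHex m ++ s := by
  intro m
  induction m using Nat.strong_induction_on with
  | _ m ih =>
    intro hm s
    rw [pvALoop2, dif_pos (by exact_mod_cast hm : (m : Int) > 0)]
    have hq : PySem.Int.mod (m : Int) 16 = ((m % 16 : Nat) : Int) := by
      exact_mod_cast PySem.Int.mod_natCast m 16
    have hd : PySem.Int.floordiv (m : Int) 16 = ((m / 16 : Nat) : Int) := by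
      exact_mod_cast PySem.Int.floordiv_natCast m 16
    simp only [hq, hd]
    rw [pvLetters_eq (m % 16) (Nat.mod_lt _ (by norm_num))]
    by_cases h : m < 16
    · rw [Nat.div_eq_of_lt h, Nat.mod_eq_of_lt h]
      rw [pvALoop2, dif_neg (by norm_num), pvToHex, dif_pos h]
    · rw [ih (m / 16) (by omega) (by omega) (pvHexDig (m % 16) ++ s)]
      conv_rhs => rw [pvToHex]
      rw [dif_neg h, String.append_assoc]

theorem pvDecimal_eq (n b : Int) :
    (if n > 0 then (PySem.Int.toStr n).toList else []).foldl
        (fun acc ch => acc * b + ((ch.toNat : Int) - 48)) 0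
      = pvALoop1 n b 0 0 := by
  rw [pvALoop1_eq b n.toNat n rfl 0 0, pow_zero, mul_one, zero_add]
  by_cases h : n > 0
  · rw [if_pos h, PySem.Int.toList_toStr, PySem.Int.toChars,
      if_neg (by omega : ¬ n < 0), Nat.toDigits,
      toDigitsCore_eq_pvDigs (n.toNat + 1) n.toNat [] (by omega), List.append_nil]
    rw [foldl_pvDigs_gen b n.toNat 0]
    simp
  · rw [if_neg h]
    have : n.toNat = 0 := by omega
    rw [this, pvVal]
    simp

-- ===== VERDICT (by name: the statement is the Claim_ definition above) =====
theorem f_converteBaseNBase16_spec : Claim_equal_f_converteBaseNBase16 := by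
  intro n b _
  unfold Spec_f_converteBaseNBase16 f_converteBaseNBase16 f_converteBaseNBase16_alt
  simp only []
  rw [pvDecimal_eq n b]
  set d := pvALoop1 n b 0 0 with hd
  by_cases h : d < 10
  · rw [if_pos h, if_pos h]
  · rw [if_neg h, if_neg h, pvFormatX, if_neg (by omega : ¬ d < 0)]
    have h2 : pvALoop2 d "" = pvToHex d.toNat ++ "" := by
      conv_lhs => rw [show d = ((d.toNat : Nat) : Int) from by omega]
      exact pvALoop2_eq d.toNat (by omega) ""
    rw [h2, String.append_empty]
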